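-- pv_equiv track=rewrite | github.com/rasputin28/Cerebro-legal | recon_diputados2.py | absolutize
-- ===== SOURCE A (Python) =====
-- def absolutize(href: str, base: str) -> str:
--     if href.startswith("http"):
--         return href
--     if href.startswith("/"):
--         return f"https://www.diputados.gob.mx{href}"
--     # relative -> resolve against base directory
--     base_dir = base.rsplit("/", 1)[0]
--     while href.startswith("../"):
--         href = href[3:]
--         base_dir = base_dir.rsplit("/", 1)[0]
--     return f"{base_dir}/{href}"
-- ===== SOURCE B (Python) =====
-- def absolutize(href: str, base: str) -> str:
--     if href.startswith("http"):
--         return href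
--     if href.startswith("/"):
--         return f"https://www.diputados.gob.mx{href}"
--     # count the maximal leading run of "../", then drop that many (+1)
--     # trailing segments of base in ONE rsplit call
--     n = 0
--     while href.startswith("../", 3 * n):
--         n += 1
--     return base.rsplit("/", n + 1)[0] + "/" + href[3 * n:]
-- ===== Notes on version B (the rewrite author's own statement) =====
-- stated objective: alternative
-- what changed: A's interleaved while-loop (strip one '../' and rsplit the base once per iteration) is replaced by counting the leading '../' run first and then dropping all n+1 trailing base segments in a single rsplit('/', n+1) call with one slice of href.
import Mathlib
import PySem

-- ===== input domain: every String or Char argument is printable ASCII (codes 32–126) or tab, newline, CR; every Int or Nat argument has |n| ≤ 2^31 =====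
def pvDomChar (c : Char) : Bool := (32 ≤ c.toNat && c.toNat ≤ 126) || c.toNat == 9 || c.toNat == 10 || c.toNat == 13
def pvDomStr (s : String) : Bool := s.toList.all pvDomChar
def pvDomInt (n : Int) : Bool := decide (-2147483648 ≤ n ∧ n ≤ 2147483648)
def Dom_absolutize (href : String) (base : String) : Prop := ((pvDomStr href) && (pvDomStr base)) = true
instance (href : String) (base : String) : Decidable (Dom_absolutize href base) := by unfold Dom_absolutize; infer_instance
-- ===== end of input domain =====

-- B resolves the relative case by counting the leading '../' run once and doing a single
-- multi-segment rsplit, instead of A's strip-one/rsplit-once loop; same results everywhere.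

-- shared hand port of s.rsplit("/", 1)[0] on List Char (exact: removes the last
-- '/'-segment, returns s unchanged when s contains no '/')
def dropLastSeg (s : List Char) : List Char :=
  if '/' ∈ s then ((s.reverse.dropWhile (· ≠ '/')).drop 1).reverse else s

-- ===== PORT A =====
-- A's while loop: each iteration strips "../" from href and rsplits base_dir once
def resolveLoopA (h : List Char) (bd : List Char) : List Char × List Char :=
  if PySem.Chars.startswith h ['.', '.', '/'] then
    resolveLoopA (h.drop 3) (dropLastSeg bd)
  else (h, bd)
termination_by h.length
decreasing_by
  have := List.IsPrefix.length_le ((PySem.Chars.startswith_iff _ _).mp (by assumption))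
  simp at this ⊢; omega

def absolutize (href : String) (base : String) : String :=
  if PySem.Str.startswith href "http" then href
  else if PySem.Str.startswith href "/" then
    String.ofList ("https://www.diputados.gob.mx".toList ++ href.toList)
  else
    let p := resolveLoopA href.toList (dropLastSeg base.toList)
    String.ofList (p.2 ++ '/' :: p.1)

-- ===== PORT B =====
-- hand port of base.rsplit("/", k)[0] (exact: drops the last min(k, #slashes) segments)
def rsplitHead (s : List Char) : Nat → List Char
  | 0 => s
  | k + 1 => rsplitHead (dropLastSeg s) k

-- Source B's counting loop: n += 1 while href.startswith("../", 3*n); the start argument is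
-- ported as `h.drop (3*n)` (exact for a nonnegative start: past-the-end drop gives [],
-- on which a nonempty prefix test is False, as in Python)
def countLoopB (h : List Char) (n : Nat) : Nat :=
  if PySem.Chars.startswith (h.drop (3 * n)) ['.', '.', '/'] then countLoopB h (n + 1)
  else n
termination_by h.length - 3 * n
decreasing_by
  have := List.IsPrefix.length_le ((PySem.Chars.startswith_iff _ _).mp (by assumption))
  simp at this; omega

def absolutize_alt (href : String) (base : String) : String :=
  if PySem.Str.startswith href "http" then href
  else if PySem.Str.startswith href "/" then
    String.ofList ("https://www.diputados.gob.mx".toList ++ href.toList)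
  else
    let n := countLoopB href.toList 0
    -- href[3*n:] ported as drop (exact: 3*n ≥ 0)
    String.ofList (rsplitHead base.toList (n + 1) ++ '/' :: href.toList.drop (3 * n))

-- ===== PRECONDITION & SPEC =====
def Spec_absolutize (href : String) (base : String) (out : String) : Prop := out = absolutize_alt href base
instance (href : String) (base : String) (out : String) : Decidable (Spec_absolutize href base out) := by unfold Spec_absolutize; infer_instance

-- ===== CLAIM (what is proved, stated in full; the proofs are below) =====
def Claim_equal_absolutize : Prop := ∀ (href : String) (base : String), Dom_absolutize href base → Spec_absolutize href base (absolutize href base)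

-- ===== LEMMAS AND PROOFS =====

-- proof-side: number of leading "../" prefixes of h
def cntDots (h : List Char) : Nat :=
  if PySem.Chars.startswith h ['.', '.', '/'] then cntDots (h.drop 3) + 1 else 0
termination_by h.length
decreasing_by
  have := List.IsPrefix.length_le ((PySem.Chars.startswith_iff _ _).mp (by assumption))
  simp at this ⊢; omega

lemma countLoopB_eq (h : List Char) (n : Nat) :
    countLoopB h n = n + cntDots (h.drop (3 * n)) := by
  fun_induction countLoopB h n with
  | case1 n hs ih =>
    rw [ih]
    have h3 : 3 * (n + 1) = 3 + 3 * n := by ring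
    rw [h3]
    conv_rhs => rw [cntDots]
    simp [hs, List.drop_drop]
    ring_nf
  | case2 n hs =>
    rw [cntDots]; simp [hs]

lemma resolveLoopA_eq (h : List Char) (bd : List Char) :
    resolveLoopA h bd = (h.drop (3 * cntDots h), rsplitHead bd (cntDots h)) := by
  fun_induction resolveLoopA h bd with
  | case1 h bd hs ih =>
    rw [ih]
    conv_rhs => rw [cntDots]
    simp only [hs, if_pos, List.drop_drop, rsplitHead]
    have h3 : 3 * (cntDots (h.drop 3) + 1) = 3 * cntDots (h.drop 3) + 3 := by ring
    rw [h3, Nat.add_comm 3 (3 * cntDots (h.drop 3))]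
  | case2 h bd hs =>
    rw [cntDots]; simp [hs, rsplitHead]

-- ===== VERDICT (by name: the statement is the Claim_ definition above) =====
theorem absolutize_spec : Claim_equal_absolutize := by
  intro href base _
  unfold Spec_absolutize absolutize absolutize_alt
  split
  · rfl
  · split
    · rfl
    · simp only [countLoopB_eq, Nat.mul_zero, List.drop_zero, Nat.zero_add,
        resolveLoopA_eq, rsplitHead]
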